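-- pv_equiv track=rewrite | github.com/hjyoon0129/poinroute | core/middleware.py | is_suspicious_path
-- ===== SOURCE A (Python) =====
-- def is_suspicious_path(full_path: str) -> bool:
--     fp = (full_path or "").lower()
--
--     suspicious_keywords = [
--         "/wp-admin",
--         "/xmlrpc.php",
--         "/.env",
--         "/.git",
--         "/phpmyadmin",
--         "/adminer",
--         "/server-status",
--         "select%20",
--         "union%20",
--         "../",
--         "%2e%2e",
--         "%00",
--     ]
--
--     return any(keyword in fp for keyword in suspicious_keywords)
-- ===== SOURCE B (Python) =====
-- _SUSPICIOUS_KEYWORDS = (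
--     "/wp-admin",
--     "/xmlrpc.php",
--     "/.env",
--     "/.git",
--     "/phpmyadmin",
--     "/adminer",
--     "/server-status",
--     "select%20",
--     "union%20",
--     "../",
--     "%2e%2e",
--     "%00",
-- )
--
--
-- def is_suspicious_path(full_path: str) -> bool:
--     # Position-major single scan: at each index of the lowercased path,
--     # test whether some keyword starts there.
--     fp = (full_path or "").lower()
--     for i in range(len(fp)):
--         if any(fp.startswith(k, i) for k in _SUSPICIOUS_KEYWORDS):
--             return True
--     return False
-- ===== Notes on version B (the rewrite author's own statement) =====
-- stated objective: alternative
-- what changed: Keyword-major loop of independent full substring searches replaced by one position-major left-to-right scan that tests all keywords as prefixes at each offset.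
import Mathlib
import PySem

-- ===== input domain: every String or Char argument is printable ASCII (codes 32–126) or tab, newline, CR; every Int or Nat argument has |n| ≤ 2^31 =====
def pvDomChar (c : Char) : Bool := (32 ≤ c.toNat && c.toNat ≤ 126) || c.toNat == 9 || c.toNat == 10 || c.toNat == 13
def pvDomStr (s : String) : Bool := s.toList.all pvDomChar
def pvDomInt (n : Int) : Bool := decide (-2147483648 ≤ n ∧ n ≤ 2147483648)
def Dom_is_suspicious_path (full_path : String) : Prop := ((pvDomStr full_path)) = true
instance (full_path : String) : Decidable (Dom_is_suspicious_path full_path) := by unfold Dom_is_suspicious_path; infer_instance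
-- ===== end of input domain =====

-- B replaces A's keyword-major loop of independent substring searches by one
-- position-major scan testing all keywords as prefixes at each offset (alternative, same cost).
-- ===== PORT A =====
def pvKeywordsA : List String :=
  ["/wp-admin", "/xmlrpc.php", "/.env", "/.git", "/phpmyadmin", "/adminer",
   "/server-status", "select%20", "union%20", "../", "%2e%2e", "%00"]

-- fp = (full_path or "").lower(); 'full_path or ""' is full_path itself for every str input
def is_suspicious_path (full_path : String) : Bool :=
  let fp : List Char := PySem.Chars.lower full_path.toList
  pvKeywordsA.any (fun keyword => PySem.Chars.isIn keyword.toList fp)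

-- ===== PORT B =====
def pvKeywordsB : List (List Char) :=
  ["/wp-admin".toList, "/xmlrpc.php".toList, "/.env".toList, "/.git".toList,
   "/phpmyadmin".toList, "/adminer".toList, "/server-status".toList,
   "select%20".toList, "union%20".toList, "../".toList, "%2e%2e".toList, "%00".toList]

-- 'for i in range(len(fp)): if any(fp.startswith(k, i) …)' as structural recursion on the suffix at i
def pvScanB : List Char → Bool
  | [] => false
  | c :: rest =>
      (pvKeywordsB.any (fun k => k.isPrefixOf (c :: rest))) || pvScanB rest

def is_suspicious_path_alt (full_path : String) : Bool :=
  pvScanB (PySem.Chars.lower full_path.toList)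

-- ===== PRECONDITION & SPEC =====
def Spec_is_suspicious_path (full_path : String) (out : Bool) : Prop := out = is_suspicious_path_alt full_path
instance (full_path : String) (out : Bool) : Decidable (Spec_is_suspicious_path full_path out) := by unfold Spec_is_suspicious_path; infer_instance

-- ===== CLAIM (what is proved, stated in full; the proofs are below) =====
def Claim_equal_is_suspicious_path : Prop := ∀ (full_path : String), Dom_is_suspicious_path full_path → Spec_is_suspicious_path full_path (is_suspicious_path full_path)

-- ===== LEMMAS AND PROOFS =====

-- B's scan finds exactly the nonempty-keyword infix occurrences (all keywords are nonempty)
theorem pvScanB_eq_true_iff (l : List Char) :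
    pvScanB l = true ↔ ∃ k ∈ pvKeywordsB, k <:+: l := by
  induction l with
  | nil =>
      simp only [pvScanB]
      constructor
      · intro h; exact absurd h (by decide)
      · rintro ⟨k, hk, hinf⟩
        have hnil : k = [] := List.eq_nil_of_infix_nil hinf
        subst hnil
        revert hk; decide
  | cons c rest ih =>
      simp only [pvScanB, Bool.or_eq_true, List.any_eq_true, ih]
      constructor
      · rintro (⟨k, hk, hp⟩ | ⟨k, hk, hinf⟩)
        · exact ⟨k, hk, (List.isPrefixOf_iff_prefix.mp hp).isInfix⟩
        · exact ⟨k, hk, List.infix_cons_iff.mpr (Or.inr hinf)⟩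
      · rintro ⟨k, hk, hinf⟩
        rcases List.infix_cons_iff.mp hinf with hpre | hinf'
        · exact Or.inl ⟨k, hk, List.isPrefixOf_iff_prefix.mpr hpre⟩
        · exact Or.inr ⟨k, hk, hinf'⟩

theorem pvKeywordsB_eq : pvKeywordsB = pvKeywordsA.map String.toList := by decide

-- ===== VERDICT (by name: the statement is the Claim_ definition above) =====
theorem is_suspicious_path_spec : Claim_equal_is_suspicious_path := by
  intro full_path _
  unfold Spec_is_suspicious_path is_suspicious_path is_suspicious_path_alt
  rw [Bool.eq_iff_iff, pvScanB_eq_true_iff, pvKeywordsB_eq]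
  simp only [List.any_eq_true, PySem.Chars.isIn_iff_infix, List.mem_map]
  constructor
  · rintro ⟨k, hk, hinf⟩; exact ⟨k.toList, ⟨k, hk, rfl⟩, hinf⟩
  · rintro ⟨_, ⟨k, hk, rfl⟩, hinf⟩; exact ⟨k, hk, hinf⟩
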